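-- pv_equiv track=rewrite | github.com/yingfengqing/11 | DES_linear.py | self_xor
-- ===== SOURCE A (Python) =====
-- def self_xor(num,wide):
--     count=0
--     for i in range(wide):
--         if (num&1):
--             count+=1
--         num>>=1
--     if(count%2==0):  #偶数个1异或就是0，
--         return 0
--     return 1         #奇数个1异或就是1，
-- ===== SOURCE B (Python) =====
-- def self_xor(num, wide):
--     # Parity of the low `wide` bits: mask them out with %, then use int.bit_count.
--     if wide < 0:
--         return 0
--     return (num % (1 << wide)).bit_count() & 1
-- ===== Notes on version B (the rewrite author's own statement) =====
-- stated objective: faster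
-- what changed: Replaces the per-bit Python loop (shift+test wide times) by a single mask (num % 2**wide) followed by int.bit_count, taking the parity of the popcount.
import Mathlib
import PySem

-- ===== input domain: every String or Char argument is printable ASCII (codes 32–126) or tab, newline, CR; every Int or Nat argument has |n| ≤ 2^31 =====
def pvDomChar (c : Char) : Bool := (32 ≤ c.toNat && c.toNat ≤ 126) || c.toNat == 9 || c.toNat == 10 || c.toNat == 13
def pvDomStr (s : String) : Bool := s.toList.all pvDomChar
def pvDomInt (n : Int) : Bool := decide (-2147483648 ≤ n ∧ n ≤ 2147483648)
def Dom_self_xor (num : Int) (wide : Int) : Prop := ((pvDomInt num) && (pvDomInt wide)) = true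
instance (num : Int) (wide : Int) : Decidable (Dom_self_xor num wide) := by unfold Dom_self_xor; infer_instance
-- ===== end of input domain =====

-- B replaces A's per-bit counting loop by mask-then-popcount (num % 2**wide, then bit_count parity); objective: faster.


-- ===== PORT A =====
-- for i in range(wide): if num & 1: count += 1; num >>= 1 — state (num, count) folded over range(wide)
def self_xor (num : Int) (wide : Int) : Int :=
  if PySem.Int.mod
      ((PySem.List.pyRange 0 wide 1).foldl
        (fun (st : Int × Int) (_ : Int) =>
          (st.1 >>> (1 : Nat), if PySem.Int.band st.1 1 ≠ 0 then st.2 + 1 else st.2))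
        (num, 0)).2 2 = 0
  then 0 else 1

-- ===== PORT B =====
def self_xor_alt (num : Int) (wide : Int) : Int :=
  if wide < 0 then 0
  else PySem.Int.band ((PySem.Int.bitCount (PySem.Int.mod num ((1 : Int) <<< wide.toNat)) : Nat) : Int) 1

-- ===== PRECONDITION & SPEC =====
def Spec_self_xor (num : Int) (wide : Int) (out : Int) : Prop := out = self_xor_alt num wide
instance (num : Int) (wide : Int) (out : Int) : Decidable (Spec_self_xor num wide out) := by unfold Spec_self_xor; infer_instance

-- ===== CLAIM (what is proved, stated in full; the proofs are below) =====
def Claim_equal_self_xor : Prop := ∀ (num : Int) (wide : Int), Dom_self_xor num wide → Spec_self_xor num wide (self_xor num wide)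

-- ===== LEMMAS AND PROOFS =====

-- the count A's loop adds while consuming w iterations from state num
def pvLoopCount : Int → Nat → Int
  | _, 0 => 0
  | n, w + 1 => (if PySem.Int.band n 1 ≠ 0 then 1 else 0) + pvLoopCount (n >>> (1 : Nat)) w

lemma pvFoldl_count (l : List Int) (n c : Int) :
    (l.foldl
      (fun (st : Int × Int) (_ : Int) =>
        (st.1 >>> (1 : Nat), if PySem.Int.band st.1 1 ≠ 0 then st.2 + 1 else st.2))
      (n, c)).2 = c + pvLoopCount n l.length := by
  induction l generalizing n c with
  | nil => simp [pvLoopCount]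
  | cons x xs ih =>
      simp only [List.foldl_cons, List.length_cons, pvLoopCount, ih]
      split_ifs <;> ring

lemma pvEmod_split (n : Int) (w : Nat) :
    n % 2 ^ (w + 1) = n % 2 + 2 * ((n >>> (1 : Nat)) % 2 ^ w) := by
  have hs : n >>> (1 : Nat) = n / 2 := by simp [Int.shiftRight_eq_div_pow]
  rw [hs]
  have hk : (0:Int) < 2 ^ w := by positivity
  have h1 : n = 2 * (n / 2) + n % 2 := (Int.mul_ediv_add_emod n 2).symm.trans (by ring)
  have h2 : n / 2 = 2 ^ w * (n / 2 / 2 ^ w) + (n / 2) % 2 ^ w :=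
    (Int.mul_ediv_add_emod (n / 2) (2 ^ w)).symm.trans (by ring)
  have hr1 : 0 ≤ n % 2 := Int.emod_nonneg n (by norm_num)
  have hr1' : n % 2 < 2 := Int.emod_lt_of_pos n (by norm_num)
  have hr2 : 0 ≤ (n / 2) % 2 ^ w := Int.emod_nonneg _ (by positivity)
  have hr2' : (n / 2) % 2 ^ w < 2 ^ w := Int.emod_lt_of_pos _ hk
  have hn : n = (n % 2 + 2 * ((n / 2) % 2 ^ w)) + 2 ^ (w + 1) * (n / 2 / 2 ^ w) := by
    rw [pow_succ]; nlinarith [h1, h2]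
  calc n % 2 ^ (w + 1)
      = ((n % 2 + 2 * ((n / 2) % 2 ^ w)) + 2 ^ (w + 1) * (n / 2 / 2 ^ w)) % 2 ^ (w + 1) := by rw [← hn]
    _ = (n % 2 + 2 * ((n / 2) % 2 ^ w)) % 2 ^ (w + 1) := Int.add_mul_emod_self_left _ _ _
    _ = n % 2 + 2 * ((n / 2) % 2 ^ w) := by
        apply Int.emod_eq_of_lt (by omega)
        rw [pow_succ]; omega

-- popcount of e + 2*d for e ∈ {0,1}, 0 ≤ d
lemma pvBitCount_step (e d : Int) (he : e = 0 ∨ e = 1) (hd : 0 ≤ d) :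
    (PySem.Int.bitCount (e + 2 * d) : Int) = e + (PySem.Int.bitCount d : Int) := by
  by_cases h0 : e + 2 * d = 0
  · have he0 : e = 0 := by omega
    have hd0 : d = 0 := by omega
    simp [he0, hd0, PySem.Int.bitCount_zero]
  · have hpos : 0 < e + 2 * d := by omega
    rw [PySem.Int.bitCount_of_pos hpos]
    have hmod : PySem.Int.mod (e + 2 * d) 2 = e := by
      rw [PySem.Int.mod_eq_emod_of_pos (by norm_num)]
      rw [show e + 2 * d = e + 2 * d by ring, Int.add_mul_emod_self_left]
      exact Int.emod_eq_of_lt (by omega) (by omega)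
    have hdiv : PySem.Int.floordiv (e + 2 * d) 2 = d := by
      rw [PySem.Int.floordiv_eq_ediv_of_pos (by norm_num)]
      omega
    rw [hmod, hdiv]
    have : (PySem.Int.mod (e+2*d) 2).toNat = e.toNat := by rw [hmod]
    push_cast
    omega

lemma pvLoopCount_eq_bitCount (w : Nat) : ∀ n : Int,
    pvLoopCount n w = (PySem.Int.bitCount (n % 2 ^ w) : Int) := by
  induction w with
  | zero => intro n; simp [pvLoopCount, PySem.Int.bitCount_zero]
  | succ w ih =>
      intro n
      have hb : PySem.Int.band n 1 = n % 2 := by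
        rw [PySem.Int.band_one, PySem.Int.mod_eq_emod_of_pos (by norm_num)]
      have he : n % 2 = 0 ∨ n % 2 = 1 := by omega
      have hd : 0 ≤ (n >>> (1 : Nat)) % 2 ^ w :=
        Int.emod_nonneg _ (by positivity)
      rw [pvEmod_split, pvBitCount_step _ _ he hd, pvLoopCount, ih, hb]
      rcases he with h | h <;> simp [h]

-- ===== VERDICT (by name: the statement is the Claim_ definition above) =====
theorem self_xor_spec : Claim_equal_self_xor := by
  intro num wide _
  unfold Spec_self_xor self_xor self_xor_alt
  have hlen : (PySem.List.pyRange 0 wide 1).length = (wide - 0).toNat :=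
    PySem.List.length_pyRange_one 0 wide
  rw [pvFoldl_count, hlen]
  by_cases hw : wide < 0
  · have : (wide - 0).toNat = 0 := by omega
    rw [this]
    simp [hw, pvLoopCount, PySem.Int.mod]
  · simp only [if_neg hw]
    have hsl : (1 : Int) <<< wide.toNat = 2 ^ wide.toNat := by simp [Int.shiftLeft_eq]
    have hmod : PySem.Int.mod num ((1 : Int) <<< wide.toNat) = num % 2 ^ wide.toNat := by
      rw [hsl, PySem.Int.mod_eq_emod_of_pos (by positivity)]
    have hwt : (wide - 0).toNat = wide.toNat := by omega
    rw [hwt, hmod, zero_add, pvLoopCount_eq_bitCount]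
    set m : Nat := PySem.Int.bitCount (num % 2 ^ wide.toNat) with hm
    rw [PySem.Int.band_one, PySem.Int.mod_eq_emod_of_pos (by norm_num)]
    have : (m : Int) % 2 = 0 ∨ (m : Int) % 2 = 1 := by omega
    rcases this with h | h <;> simp [h]
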